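-- pv_equiv track=rewrite | github.com/robinson-create/ANCREAI | app/services/presentation_slide_planner.py | _pick_layout
-- ===== SOURCE A (Python) =====
-- def _pick_layout(
--     available: list[str],
--     recent_layouts: list[str],
-- ) -> str:
--     """Pick a layout maximizing diversity within the cluster window."""
--     if not available:
--         return "accent-top"
--
--     # Try to pick one not used in the recent window
--     for layout in available:
--         if layout not in recent_layouts:
--             return layout
--
--     # All used in recent window — pick the least recently used
--     for layout in available:
--         if layout != recent_layouts[-1]:  # At least avoid immediate repeat
--             return layout
--
--     return available[0]
-- ===== SOURCE B (Python) =====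
-- def _pick_layout(
--     available: list[str],
--     recent_layouts: list[str],
-- ) -> str:
--     """Pick a layout maximizing diversity within the cluster window."""
--     if not available:
--         return "accent-top"
--
--     recent = set(recent_layouts)
--     last = recent_layouts[-1] if recent_layouts else None
--
--     def priority(layout: str) -> int:
--         if layout not in recent:
--             return 0
--         return 1 if layout != last else 2
--
--     # min is stable: first element of lowest priority, reproducing first-match-wins
--     return min(available, key=priority)
-- ===== Notes on version B (the rewrite author's own statement) =====
-- stated objective: simpler
-- what changed: Replaced the two sequential fallback scan loops by a single stable min over a 3-level priority key (0 unseen, 1 seen but not last, 2 last), with the recent window precomputed as a set.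
import Mathlib
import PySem

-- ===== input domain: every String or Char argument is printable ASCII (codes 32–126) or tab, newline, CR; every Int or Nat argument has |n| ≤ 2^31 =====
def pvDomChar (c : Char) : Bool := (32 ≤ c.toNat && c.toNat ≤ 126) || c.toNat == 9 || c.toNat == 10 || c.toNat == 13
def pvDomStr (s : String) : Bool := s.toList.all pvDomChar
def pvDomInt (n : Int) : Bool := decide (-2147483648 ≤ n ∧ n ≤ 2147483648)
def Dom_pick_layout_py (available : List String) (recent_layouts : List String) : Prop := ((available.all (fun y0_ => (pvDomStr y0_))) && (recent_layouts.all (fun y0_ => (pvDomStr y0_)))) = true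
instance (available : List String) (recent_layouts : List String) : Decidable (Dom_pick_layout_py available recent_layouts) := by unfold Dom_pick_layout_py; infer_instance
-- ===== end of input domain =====

-- B replaces A's two sequential fallback scans by one stable min over a 3-level priority key (simpler decomposition).

-- ===== PORT A =====
-- first for-loop: return the first layout not used in the recent window
-- second for-loop: return the first layout different from recent_layouts[-1]
-- (that loop is only reached when every available layout is in recent_layouts, so recent_layouts ≠ [])
def pick_layout_py (available : List String) (recent_layouts : List String) : String :=
  match available with
  | [] => "accent-top"
  | a :: rest =>
    match (a :: rest).find? (fun l => !(recent_layouts.contains l)) with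
    | some l => l
    | none =>
      match (a :: rest).find? (fun l => !(PySem.List.pyGet? recent_layouts (-1) == some l)) with
      | some l => l
      | none => a  -- available[0]

-- ===== PORT B =====
-- priority key over the precomputed set and last element: 0 if unseen, 1 if seen but not the previous layout, 2 otherwise
def pvPrio2 (recent : PySem.Set String) (last : Option String) (l : String) : Nat :=
  if recent.contains l then
    (if last == some l then 2 else 1)
  else 0

-- min(available, key=priority): stable fold keeping the first element of strictly smaller key
def pick_layout_py_alt (available : List String) (recent_layouts : List String) : String :=
  match available with
  | [] => "accent-top"
  | a :: rest =>
    let recent := PySem.Set.ofList recent_layouts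
    let last := PySem.List.pyGet? recent_layouts (-1)  -- recent_layouts[-1] if recent_layouts else None
    rest.foldl (fun best x => if pvPrio2 recent last x < pvPrio2 recent last best then x else best) a

-- ===== PRECONDITION & SPEC =====
def Spec_pick_layout_py (available : List String) (recent_layouts : List String) (out : String) : Prop := out = pick_layout_py_alt available recent_layouts
instance (available : List String) (recent_layouts : List String) (out : String) : Decidable (Spec_pick_layout_py available recent_layouts out) := by unfold Spec_pick_layout_py; infer_instance

-- ===== CLAIM (what is proved, stated in full; the proofs are below) =====
def Claim_equal_pick_layout_py : Prop := ∀ (available : List String) (recent_layouts : List String), Dom_pick_layout_py available recent_layouts → Spec_pick_layout_py available recent_layouts (pick_layout_py available recent_layouts)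

-- ===== LEMMAS AND PROOFS =====

-- proof-side shorthand: the priority key expressed directly over the input lists
def pvPrio (recent_layouts : List String) (l : String) : Nat :=
  if recent_layouts.contains l then
    (if PySem.List.pyGet? recent_layouts (-1) == some l then 2 else 1)
  else 0

theorem pvPrio2_eq (recent : List String) (l : String) :
    pvPrio2 (PySem.Set.ofList recent) (PySem.List.pyGet? recent (-1)) l = pvPrio recent l := by
  unfold pvPrio2 pvPrio
  have hmem : (PySem.Set.ofList recent).contains l = recent.contains l := by
    simp [List.contains_iff_mem, PySem.Set.mem_ofList]
  rw [hmem]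

theorem pvPrio_cases (r : List String) (l : String) :
    pvPrio r l = 0 ∨ pvPrio r l = 1 ∨ pvPrio r l = 2 := by
  unfold pvPrio; split_ifs <;> simp

theorem pvPrio_eq_zero (r : List String) (l : String) :
    (pvPrio r l = 0) ↔ ¬ (r.contains l = true) := by
  unfold pvPrio; split_ifs <;> simp_all

theorem pvPrio_eq_one (r : List String) (l : String) (hc : r.contains l = true) :
    (pvPrio r l = 1) ↔ ¬ (PySem.List.pyGet? r (-1) == some l) = true := by
  unfold pvPrio; split_ifs <;> simp_all

-- find? only looks at the predicate's values on members
theorem find?_congr_mem {α : Type} (p q : α → Bool) :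
    ∀ (l : List α), (∀ x ∈ l, p x = q x) → l.find? p = l.find? q := by
  intro l
  induction l with
  | nil => intro _; rfl
  | cons a t ih =>
    intro h
    have ha := h a (by simp)
    simp only [List.find?, ha]
    cases q a with
    | true => rfl
    | false => exact ih (fun x hx => h x (List.mem_cons_of_mem a hx))

-- characterization of B's stable-min fold by priority levels
theorem fold_char (r : List String) :
    ∀ (l : List String) (acc : String),
      l.foldl (fun best x => if pvPrio r x < pvPrio r best then x else best) acc =
        (if pvPrio r acc = 0 then acc
         else match l.find? (fun x => decide (pvPrio r x = 0)) with
         | some x => x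
         | none =>
           if pvPrio r acc = 1 then acc
           else match l.find? (fun x => decide (pvPrio r x = 1)) with
           | some x => x
           | none => acc) := by
  intro l
  induction l with
  | nil => intro acc; simp [List.foldl]
  | cons y t ih =>
    intro acc
    simp only [List.foldl]
    rw [ih]
    rcases pvPrio_cases r acc with ha | ha | ha <;>
      rcases pvPrio_cases r y with hy | hy | hy <;>
      simp [List.find?, ha, hy]

-- ===== VERDICT (by name: the statement is the Claim_ definition above) =====
theorem pick_layout_py_spec : Claim_equal_pick_layout_py := by
  intro available recent _
  unfold Spec_pick_layout_py pick_layout_py pick_layout_py_alt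
  match available with
  | [] => rfl
  | a :: rest =>
    simp only
    have hfun : (fun (best x : String) =>
        if pvPrio2 (PySem.Set.ofList recent) (PySem.List.pyGet? recent (-1)) x <
           pvPrio2 (PySem.Set.ofList recent) (PySem.List.pyGet? recent (-1)) best then x else best) =
        (fun best x => if pvPrio recent x < pvPrio recent best then x else best) := by
      funext best x; rw [pvPrio2_eq, pvPrio2_eq]
    rw [hfun, fold_char]
    -- align A's first loop predicate with priority 0
    have h0 : (a :: rest).find? (fun l => !(recent.contains l)) =
        (a :: rest).find? (fun x => decide (pvPrio recent x = 0)) := by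
      apply find?_congr_mem
      intro x _
      by_cases hc : recent.contains x = true <;> simp [pvPrio_eq_zero, hc]
    rw [h0]
    by_cases hz : pvPrio recent a = 0
    · rw [List.find?_cons_of_pos (by simp [hz])]
      simp [hz]
    · rw [List.find?_cons_of_neg (by simp [hz])]
      cases hf : rest.find? (fun x => decide (pvPrio recent x = 0)) with
      | some x => simp [hz]
      | none =>
        -- no priority-0 layout: every element of a :: rest is in recent
        have hall : ∀ x ∈ (a :: rest), recent.contains x = true := by
          intro x hx
          rcases List.mem_cons.mp hx with rfl | hx
          · by_contra hc; exact hz ((pvPrio_eq_zero recent x).mpr hc)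
          · by_contra hc
            have := List.find?_eq_none.mp hf x hx
            simp [pvPrio_eq_zero recent x |>.mpr hc] at this
        -- align A's second loop predicate with priority 1 (all elements are in recent here)
        have h1 : (a :: rest).find? (fun l => !(PySem.List.pyGet? recent (-1) == some l)) =
            (a :: rest).find? (fun x => decide (pvPrio recent x = 1)) := by
          apply find?_congr_mem
          intro x hx
          have hc := hall x hx
          by_cases hlast : (PySem.List.pyGet? recent (-1) == some x) = true <;>
            simp [pvPrio_eq_one recent x hc, hlast]
        rw [h1]
        by_cases ho : pvPrio recent a = 1
        · rw [List.find?_cons_of_pos (by simp [ho])]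
          simp [hz, ho]
        · rw [List.find?_cons_of_neg (by simp [ho])]
          cases hg : rest.find? (fun x => decide (pvPrio recent x = 1)) with
          | some x => simp [hz, ho]
          | none => simp [hz, ho]
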